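-- pv_equiv track=rewrite | github.com/FireChickenProductivity/BasicActionRecordAnalyzer | basic_action_record_analysis.py | compute_simplified_case_strings_list
-- ===== SOURCE A (Python) =====
-- from typing import List
--
-- def compute_simplified_case_strings_list(case_strings: List) -> List:
--     simplified_case_strings = []
--     new_case_found = False
--     final_case = case_strings[-1]
--     simplified_case_strings.append(final_case)
--     for index in range(len(case_strings) - 2, -1, -1):
--         case = case_strings[index]
--         if case != final_case or new_case_found:
--             simplified_case_strings.append(case)
--             new_case_found = True
--     simplified_case_strings.reverse()
--     return simplified_case_strings
-- ===== SOURCE B (Python) =====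
-- def compute_simplified_case_strings_list(case_strings):
--     final = case_strings[-1]
--     i = len(case_strings)
--     while i > 0 and case_strings[i - 1] == final:
--         i -= 1
--     return case_strings[:i] + [final]
-- ===== Notes on version B (the rewrite author's own statement) =====
-- stated objective: simpler
-- what changed: Instead of scanning the whole list backwards while building a reversed accumulator with a new_case_found flag and reversing at the end, B scans backwards only over the trailing run equal to the last element and returns a slice plus one copy of that element.
import Mathlib
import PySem

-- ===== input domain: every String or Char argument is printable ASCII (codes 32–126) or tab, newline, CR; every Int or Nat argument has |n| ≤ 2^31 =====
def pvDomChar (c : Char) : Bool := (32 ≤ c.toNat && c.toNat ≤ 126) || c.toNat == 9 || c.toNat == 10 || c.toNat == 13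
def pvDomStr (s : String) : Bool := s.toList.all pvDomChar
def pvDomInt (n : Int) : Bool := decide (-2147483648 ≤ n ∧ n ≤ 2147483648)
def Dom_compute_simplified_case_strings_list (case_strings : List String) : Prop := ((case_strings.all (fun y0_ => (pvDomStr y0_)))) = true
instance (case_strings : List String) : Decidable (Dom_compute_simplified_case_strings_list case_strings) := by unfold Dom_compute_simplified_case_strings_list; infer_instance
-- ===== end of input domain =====

-- B is simpler: it scans backwards only over the trailing run equal to the last element and
-- returns a slice plus one copy, instead of A's full reversed rebuild with a flag.

-- ===== PORT A =====
-- loop body of A (the if inside the for-loop), kept as a helper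
def pvStepA (final_case : String) (st : List String × Bool) (case_ : String) : List String × Bool :=
  if case_ != final_case || st.2 then (st.1 ++ [case_], true) else st

def compute_simplified_case_strings_list (case_strings : List String) : List String :=
  match PySem.List.pyGet? case_strings (-1) with
  | none => []  -- case_strings[-1] raises IndexError on []; excluded by Pre_
  | some final_case =>
    let st := (PySem.List.pyRange ((case_strings.length : Int) - 2) (-1) (-1)).foldl
      (fun st index =>
        match PySem.List.pyGet? case_strings index with
        | none => st  -- unreachable: every index of the range is in bounds
        | some case_ => pvStepA final_case st case_)
      ([final_case], false)
    st.1.reverse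

-- ===== PORT B =====
-- the backwards while-loop of B: pvScan l final i = final value of i
def pvScan (case_strings : List String) (final : String) : Nat → Nat
  | 0 => 0
  | i + 1 =>
    if PySem.List.pyGet? case_strings (i : Int) == some final then pvScan case_strings final i
    else i + 1

def compute_simplified_case_strings_list_alt (case_strings : List String) : List String :=
  match PySem.List.pyGet? case_strings (-1) with
  | none => []  -- case_strings[-1] raises IndexError on []; excluded by Pre_
  | some final =>
    PySem.List.slice case_strings none
      (some ((pvScan case_strings final case_strings.length : Nat) : Int)) ++ [final]

-- ===== PRECONDITION & SPEC =====
-- A raises IndexError on the empty list (case_strings[-1]); that is the only exception.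
def Pre_compute_simplified_case_strings_list (case_strings : List String) : Prop :=
  case_strings ≠ []
instance (case_strings : List String) : Decidable (Pre_compute_simplified_case_strings_list case_strings) := by
  unfold Pre_compute_simplified_case_strings_list; infer_instance
def pvWitness_compute_simplified_case_strings_list : List String := ["a", "a"]

def Spec_compute_simplified_case_strings_list (case_strings : List String) (out : List String) : Prop := out = compute_simplified_case_strings_list_alt case_strings
instance (case_strings : List String) (out : List String) : Decidable (Spec_compute_simplified_case_strings_list case_strings out) := by unfold Spec_compute_simplified_case_strings_list; infer_instance

-- ===== CLAIM (what is proved, stated in full; the proofs are below) =====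
def Claim_equal_compute_simplified_case_strings_list : Prop := ∀ (case_strings : List String), Dom_compute_simplified_case_strings_list case_strings → Pre_compute_simplified_case_strings_list case_strings → Spec_compute_simplified_case_strings_list case_strings (compute_simplified_case_strings_list case_strings)

-- ===== LEMMAS AND PROOFS =====

-- once the flag is true, A's loop appends every remaining element
theorem pvStepA_flag_true (f : String) (xs : List String) (acc : List String) :
    xs.foldl (pvStepA f) (acc, true) = (acc ++ xs, true) := by
  induction xs generalizing acc with
  | nil => simp
  | cons c xs ih =>
    rw [List.foldl_cons]
    have h1 : pvStepA f (acc, true) c = (acc ++ [c], true) := by simp [pvStepA]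
    rw [h1, ih]
    simp

-- A's loop keeps exactly the part of r after the leading run of copies of f
theorem pvStepA_fold (f : String) (r : List String) :
    (r.foldl (pvStepA f) ([f], false)).1 = f :: r.dropWhile (fun c => c == f) := by
  induction r with
  | nil => simp
  | cons c r ih =>
    rw [List.foldl_cons]
    by_cases hc : c == f
    · have hc' : c = f := eq_of_beq hc
      have h1 : pvStepA f ([f], false) c = ([f], false) := by simp [pvStepA, hc']
      rw [h1, ih]
      simp [hc]
    · have h1 : pvStepA f ([f], false) c = ([f] ++ [c], true) := by
        simp only [pvStepA]
        rw [if_pos]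
        simp only [Bool.or_false, bne_iff_ne, ne_eq]
        exact fun h => hc (by simp [h])
      rw [h1, pvStepA_flag_true]
      simp [hc]

-- reading a list back-to-front by index is its reverse
theorem map_getD_rev (l : List String) :
    (List.range l.length).map (fun k => l.getD (l.length - 1 - k) "") = l.reverse := by
  apply List.ext_getElem
  · simp
  · intro i h1 h2
    simp only [List.getElem_map, List.getElem_range, List.getElem_reverse]
    rw [List.getD_eq_getElem]

-- B's while-loop computes the length of l.take i minus its trailing run of copies of f
theorem pvScan_eq (l : List String) (f : String) :
    ∀ i, i ≤ l.length →
      pvScan l f i = ((l.take i).reverse.dropWhile (fun c => c == f)).length := by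
  intro i
  induction i with
  | zero => simp [pvScan]
  | succ i ih =>
    intro h
    have hi : i < l.length := by omega
    have hget : PySem.List.pyGet? l (i : Int) = some l[i] := by
      rw [PySem.List.pyGet?_natCast]
      simp [List.getElem?_eq_getElem hi]
    have htake : (l.take (i + 1)).reverse = l[i] :: (l.take i).reverse := by
      rw [List.take_add_one, List.getElem?_eq_getElem hi]
      simp
    by_cases hc : l[i] == f
    · simp [pvScan, hget, hc, htake, ih (by omega)]
    · simp [pvScan, hget, hc, htake]
      omega

-- taking the first (l.reverse.dropWhile p).length elements of l is that dropWhile reversed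
theorem take_dropWhile_rev (p : String → Bool) (l : List String) :
    l.take ((l.reverse.dropWhile p).length) = (l.reverse.dropWhile p).reverse := by
  have h : (l.reverse.dropWhile p).reverse ++ (l.reverse.takeWhile p).reverse = l := by
    rw [← List.reverse_append, List.takeWhile_append_dropWhile, List.reverse_reverse]
  calc l.take ((l.reverse.dropWhile p).length)
      = ((l.reverse.dropWhile p).reverse ++ (l.reverse.takeWhile p).reverse).take
          ((l.reverse.dropWhile p).reverse.length) := by rw [h, List.length_reverse]
    _ = (l.reverse.dropWhile p).reverse := List.take_left

-- ===== VERDICT (by name: the statement is the Claim_ definition above) =====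
theorem compute_simplified_case_strings_list_spec : Claim_equal_compute_simplified_case_strings_list := by
  intro l _ hpre
  unfold Spec_compute_simplified_case_strings_list
  rcases l.eq_nil_or_concat with rfl | ⟨l', x, rfl⟩
  · exact absurd rfl hpre
  · simp only [List.concat_eq_append]
    have hlast : PySem.List.pyGet? (l' ++ [x]) (-1) = some x := by
      rw [PySem.List.pyGet?_neg_one]; simp
    -- A side
    have hn : ((l' ++ [x]).length : Int) - 2 = (l'.length : Int) - 1 := by
      simp only [List.length_append, List.length_cons, List.length_nil]
      push_cast
      ring
    have hrange : PySem.List.pyRange ((l'.length : Int) - 1) (-1) (-1)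
        = (List.range l'.length).map (fun (k : Nat) => (l'.length : Int) - 1 - (k : Int)) := by
      rw [PySem.List.pyRange_neg_one]
      have hh : ((l'.length : Int) - 1 - (-1)).toNat = l'.length := by omega
      rw [hh]
    have hbody : (List.range l'.length).foldl
        (fun st (k : Nat) =>
          match PySem.List.pyGet? (l' ++ [x]) ((l'.length : Int) - 1 - (k : Int)) with
          | none => st
          | some case_ => pvStepA x st case_)
        ([x], false)
        = (List.range l'.length).foldl
          (fun st (k : Nat) => pvStepA x st (l'.getD (l'.length - 1 - k) "")) ([x], false) := by
      apply PySem.List.foldl_congr_mem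
      intro acc k hk
      rw [List.mem_range] at hk
      have hget : PySem.List.pyGet? (l' ++ [x]) ((l'.length : Int) - 1 - (k : Int))
          = some (l'.getD (l'.length - 1 - k) "") := by
        rw [PySem.List.pyGet?_of_nonneg_of_lt _ (by omega) (by simp; omega)]
        have ht : ((l'.length : Int) - 1 - (k : Int)).toNat = l'.length - 1 - k := by omega
        have hlt : l'.length - 1 - k < l'.length := by omega
        rw [ht, List.getElem?_append_left hlt, List.getElem?_eq_getElem hlt,
          List.getD_eq_getElem l' "" hlt]
      rw [hget]
    have hA : compute_simplified_case_strings_list (l' ++ [x])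
        = ((l'.reverse.dropWhile (fun c => c == x)).reverse) ++ [x] := by
      unfold compute_simplified_case_strings_list
      rw [hlast]
      dsimp only
      rw [hn, hrange, List.foldl_map, hbody, ← List.foldl_map,
        map_getD_rev, pvStepA_fold]
      simp
    -- B side
    have hB : compute_simplified_case_strings_list_alt (l' ++ [x])
        = ((l'.reverse.dropWhile (fun c => c == x)).reverse) ++ [x] := by
      unfold compute_simplified_case_strings_list_alt
      rw [hlast]
      dsimp only
      rw [PySem.List.slice_to_natCast]
      rw [pvScan_eq _ _ _ (le_refl _), List.take_length]
      rw [take_dropWhile_rev]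
      have hrev : (l' ++ [x]).reverse.dropWhile (fun c => c == x)
          = l'.reverse.dropWhile (fun c => c == x) := by
        rw [List.reverse_append]
        simp
      rw [hrev]
    rw [hA, hB]
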